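-- pv_equiv track=rewrite | github.com/juanauli/Inversion-Sequences-Consecutive-Patterns-of-Length-4 | consec_detect4.py | detect0123
-- ===== SOURCE A (Python) =====
-- def detect0123(sequence):
--     index = 0
--     while index < len(sequence) - 3:
--         if sequence[index] < sequence[index + 1] < sequence[index + 2] <\
--                 sequence[index + 3]:
--             return True
--         index += 1
--     return False
-- ===== SOURCE B (Python) =====
-- def detect0123(sequence):
--     run = 0
--     for i in range(1, len(sequence)):
--         if sequence[i - 1] < sequence[i]:
--             run += 1
--             if run >= 3:
--                 return True
--         else:
--             run = 0
--     return False
-- ===== Notes on version B (the rewrite author's own statement) =====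
-- stated objective: simpler
-- what changed: Replaces the fixed 4-element window scan with a single pass maintaining the length of the current strictly-ascending run, so each adjacent pair is compared once instead of up to three times.
import Mathlib
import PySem

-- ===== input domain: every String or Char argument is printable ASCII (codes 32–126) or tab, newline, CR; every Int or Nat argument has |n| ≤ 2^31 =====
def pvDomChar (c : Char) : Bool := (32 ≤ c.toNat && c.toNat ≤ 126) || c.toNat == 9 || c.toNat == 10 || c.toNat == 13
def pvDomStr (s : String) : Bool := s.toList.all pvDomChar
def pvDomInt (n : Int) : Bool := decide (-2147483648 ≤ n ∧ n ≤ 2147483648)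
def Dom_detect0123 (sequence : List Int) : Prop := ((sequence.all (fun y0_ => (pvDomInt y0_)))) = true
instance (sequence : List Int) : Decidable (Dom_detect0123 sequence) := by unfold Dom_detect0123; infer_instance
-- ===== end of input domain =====

-- B replaces A's fixed 4-element window scan with a single pass keeping the current
-- strictly-ascending run length (objective: simpler — each adjacent pair is compared once).

-- ===== PORT A =====
-- Python while loop: 'index < len(sequence) - 3' (Python int arithmetic) is exactly
-- 'index + 3 < length' for a Nat index starting at 0. All accesses are in range,
-- so getD is exact here.
def detect0123Go (sequence : List Int) (index : Nat) : Bool :=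
  if index + 3 < sequence.length then
    if sequence.getD index 0 < sequence.getD (index + 1) 0 ∧
       sequence.getD (index + 1) 0 < sequence.getD (index + 2) 0 ∧
       sequence.getD (index + 2) 0 < sequence.getD (index + 3) 0 then
      true
    else
      detect0123Go sequence (index + 1)
  else
    false
termination_by sequence.length - index
decreasing_by omega

def detect0123 (sequence : List Int) : Bool := detect0123Go sequence 0

-- ===== PORT B =====
-- The for-loop over i in range(1, len) with 'run' accumulator, transcribed as a
-- recursion over adjacent pairs (prev = sequence[i-1]).
def detect0123AltGo (prev : Int) (rest : List Int) (run : Nat) : Bool :=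
  match rest with
  | [] => false
  | x :: xs =>
    if prev < x then
      if run + 1 ≥ 3 then true else detect0123AltGo x xs (run + 1)
    else
      detect0123AltGo x xs 0

def detect0123_alt (sequence : List Int) : Bool :=
  match sequence with
  | [] => false
  | x :: xs => detect0123AltGo x xs 0

-- ===== PRECONDITION & SPEC =====
def Spec_detect0123 (sequence : List Int) (out : Bool) : Prop := out = detect0123_alt sequence
instance (sequence : List Int) (out : Bool) : Decidable (Spec_detect0123 sequence out) := by unfold Spec_detect0123; infer_instance

-- ===== CLAIM (what is proved, stated in full; the proofs are below) =====
def Claim_equal_detect0123 : Prop := ∀ (sequence : List Int), Dom_detect0123 sequence → Spec_detect0123 sequence (detect0123 sequence)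

-- ===== LEMMAS AND PROOFS =====

-- reference predicate: some window of 4 consecutive elements is strictly ascending
def hasRun : List Int → Bool
  | a :: b :: c :: d :: t =>
    (decide (a < b) && decide (b < c) && decide (c < d)) || hasRun (b :: c :: d :: t)
  | _ => false

-- the next n adjacent steps starting from prev are strictly ascending
def ascN : Nat → Int → List Int → Bool
  | 0, _, _ => true
  | _ + 1, _, [] => false
  | n + 1, prev, x :: xs => decide (prev < x) && ascN n x xs

theorem ascN_mono {k m : Nat} {prev : Int} {xs : List Int} (hkm : k ≤ m)
    (h : ascN m prev xs = true) : ascN k prev xs = true := by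
  induction m generalizing k prev xs with
  | zero =>
    have hk0 : k = 0 := Nat.le_zero.mp hkm
    subst hk0; exact h
  | succ m ih =>
    cases k with
    | zero => rfl
    | succ k =>
      cases xs with
      | nil => simp [ascN] at h
      | cons x xs =>
        simp [ascN] at h ⊢
        exact ⟨h.1, ih (Nat.succ_le_succ_iff.mp hkm) h.2⟩

theorem hasRun_cons (a : Int) (l : List Int) :
    hasRun (a :: l) = (ascN 3 a l || hasRun l) := by
  match l with
  | [] => simp [hasRun, ascN]
  | [b] => simp [hasRun, ascN]
  | [b, c] => simp [hasRun, ascN]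
  | b :: c :: d :: t => simp [hasRun, ascN, Bool.and_assoc]

theorem altGo_eq (rest : List Int) (prev : Int) (run : Nat) (hr : run ≤ 2) :
    detect0123AltGo prev rest run = (ascN (3 - run) prev rest || hasRun (prev :: rest)) := by
  induction rest generalizing prev run with
  | nil =>
    have h3 : 3 - run = (2 - run) + 1 := by omega
    simp [detect0123AltGo, h3, ascN, hasRun]
  | cons x xs ih =>
    by_cases hpx : prev < x
    · by_cases h2 : run = 2
      · subst h2
        simp [detect0123AltGo, hpx, ascN, hasRun_cons]
      · have hr1 : run ≤ 1 := by omega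
        have hstep : 3 - run = (2 - run) + 1 := by omega
        have hstep2 : 2 - run = 3 - (run + 1) := by omega
        rw [detect0123AltGo]
        simp only [hpx, if_true, if_neg (by omega : ¬ run + 1 ≥ 3)]
        rw [ih x (run + 1) (by omega), hasRun_cons prev (x :: xs), hasRun_cons x xs]
        rw [hstep]
        simp only [ascN, decide_eq_true hpx, Bool.true_and, hstep2]
        cases h1 : ascN (3 - (run + 1)) x xs
        · have h2' : ascN 2 x xs = false := by
            cases h4 : ascN 2 x xs
            · rfl
            · have := ascN_mono (k := 3 - (run + 1)) (m := 2) (by omega) h4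
              rw [h1] at this; exact absurd this (by simp)
          have h3' : ascN 3 x xs = false := by
            cases h4 : ascN 3 x xs
            · rfl
            · have := ascN_mono (k := 3 - (run + 1)) (m := 3) (by omega) h4
              rw [h1] at this; exact absurd this (by simp)
          simp [h2', h3']
        · simp
    · rw [detect0123AltGo]
      simp only [hpx, if_false]
      rw [ih x 0 (by omega), hasRun_cons prev (x :: xs)]
      have h3 : 3 - run = (2 - run) + 1 := by omega
      rw [h3]
      simp [ascN, hpx, hasRun_cons x xs]

theorem goA_eq (sequence : List Int) (index : Nat) :
    detect0123Go sequence index = hasRun (sequence.drop index) := by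
  rw [detect0123Go]
  by_cases h : index + 3 < sequence.length
  · have h0 : index < sequence.length := by omega
    have h1 : index + 1 < sequence.length := by omega
    have h2 : index + 2 < sequence.length := by omega
    have hd : sequence.drop index =
        sequence[index] :: sequence[index+1] :: sequence[index+2] :: sequence[index+3]
          :: sequence.drop (index + 4) := by
      rw [List.drop_eq_getElem_cons h0, List.drop_eq_getElem_cons h1,
          List.drop_eq_getElem_cons h2, List.drop_eq_getElem_cons h]
    have hrec : detect0123Go sequence (index + 1) = hasRun (sequence.drop (index + 1)) :=
      goA_eq sequence (index + 1)
    have hd1 : sequence.drop (index + 1) =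
        sequence[index+1] :: sequence[index+2] :: sequence[index+3]
          :: sequence.drop (index + 4) := by
      rw [List.drop_eq_getElem_cons h1, List.drop_eq_getElem_cons h2,
          List.drop_eq_getElem_cons h]
    simp only [h, if_true, List.getD_eq_getElem _ _ h0, List.getD_eq_getElem _ _ h1,
      List.getD_eq_getElem _ _ h2, List.getD_eq_getElem _ _ h, hd, hasRun, hrec, hd1]
    split_ifs with hc
    · simp [decide_eq_true hc.1, decide_eq_true hc.2.1, decide_eq_true hc.2.2]
    · rcases Decidable.not_and_iff_not_or_not.mp hc with h' | h'
      · simp [h']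
      · rcases Decidable.not_and_iff_not_or_not.mp h' with h'' | h'' <;> simp [h'']
  · simp only [h, if_false]
    have : sequence.length ≤ index + 3 := by omega
    match hm : sequence.drop index, hlen : (sequence.drop index).length with
    | [], _ => simp [hasRun]
    | [a], _ => simp [hasRun]
    | [a, b], _ => simp [hasRun]
    | [a, b, c], _ => simp [hasRun]
    | a :: b :: c :: d :: t, _ =>
      exfalso
      have : (sequence.drop index).length = sequence.length - index := by simp
      rw [hm] at this
      simp at this
      omega
termination_by sequence.length - index
decreasing_by omega

theorem detect_eq_hasRun (sequence : List Int) : detect0123 sequence = hasRun sequence := by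
  simpa using goA_eq sequence 0

theorem alt_eq_hasRun (sequence : List Int) : detect0123_alt sequence = hasRun sequence := by
  match sequence with
  | [] => simp [detect0123_alt, hasRun]
  | x :: xs =>
    rw [detect0123_alt, altGo_eq xs x 0 (by omega), hasRun_cons x xs]
    cases h3 : ascN 3 x xs <;> simp

-- ===== VERDICT (by name: the statement is the Claim_ definition above) =====
theorem detect0123_spec : Claim_equal_detect0123 := by
  intro sequence _
  unfold Spec_detect0123
  rw [detect_eq_hasRun, alt_eq_hasRun]
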